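-- pv_equiv track=rewrite | github.com/codeWorth/hashlife | betterSortingNet.py | isOutputAllowed
-- ===== SOURCE A (Python) =====
-- NEIGHBOR_COUNT = 8
--
-- def isOutputAllowed(output: int):
-- 	neighbors = [0] * NEIGHBOR_COUNT
-- 	for j in range(len(neighbors)):
-- 		neighbors[j] = (output >> j) & 1
--
-- 	neighborCount = len(list(k for k in neighbors if k == 1))
-- 	for state in range(2):
-- 		# get state according to robust conways rules
-- 		wantedState = 0
-- 		if (state == 1 and neighborCount >= 2 and neighborCount <= 3):
-- 			wantedState = 1
-- 		elif (neighborCount == 3):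
-- 			wantedState = 1
--
-- 		# get bit magic result for this set of neighbors
-- 		gte2_lte3 = (neighbors[0] & neighbors[1] & ~neighbors[3]) & 1
-- 		eq3 = (neighbors[2] & ~neighbors[3]) & 1
-- 		newState = (eq3 | (gte2_lte3 & state)) & 1
--
-- 		# fail out if bit magic result doesn't match correct result
-- 		if (newState != wantedState): return False
--
-- 	return True
-- ===== SOURCE B (Python) =====
-- # Precompute a 256-entry table of the predicate once; each call is a table lookup.
-- def _check(v):
--     bits = [(v >> j) & 1 for j in range(8)]
--     c = sum(bits)
--     eq3 = bits[2] == 1 and bits[3] == 0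
--     gte2_lte3 = bits[0] == 1 and bits[1] == 1 and bits[3] == 0
--     return (eq3 == (c == 3)) and ((eq3 or gte2_lte3) == (2 <= c <= 3))
--
-- _ALLOWED = [_check(v) for v in range(256)]
--
-- def isOutputAllowed(output: int):
--     return _ALLOWED[output % 256]
-- ===== Notes on version B (the rewrite author's own statement) =====
-- stated objective: idiomatic
-- what changed: B precomputes once, at import time, a boolean table of the predicate over all byte values and answers each call by a single table lookup at the low byte of output, replacing A's per-call bit extraction, neighbor count and two-state verification loop.
import Mathlib
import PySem

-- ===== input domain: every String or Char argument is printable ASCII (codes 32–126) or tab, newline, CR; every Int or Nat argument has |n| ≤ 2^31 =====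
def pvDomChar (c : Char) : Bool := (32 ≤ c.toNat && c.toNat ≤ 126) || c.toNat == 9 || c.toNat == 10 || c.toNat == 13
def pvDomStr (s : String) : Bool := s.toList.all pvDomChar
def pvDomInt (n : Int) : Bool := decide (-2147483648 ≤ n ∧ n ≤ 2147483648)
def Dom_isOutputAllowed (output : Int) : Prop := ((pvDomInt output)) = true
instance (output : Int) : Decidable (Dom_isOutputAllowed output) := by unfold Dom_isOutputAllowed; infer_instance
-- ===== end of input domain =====

-- B replaces the per-call bit extraction and state loop by a 256-entry table built once, one lookup per call (idiomatic transition table).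

-- ===== PORT A =====
def isOutputAllowed (output : Int) : Bool :=
  let neighbors : List Int := (List.range 8).map (fun (j : Nat) => PySem.Int.band (output >>> j) 1)
  let neighborCount : Int := ((neighbors.filter (fun k => k == 1)).length : Int)
  (List.range 2).all (fun st =>
    let state : Int := (st : Int)
    let wantedState : Int :=
      if state == 1 && neighborCount ≥ 2 && neighborCount ≤ 3 then 1
      else if neighborCount == 3 then 1
      else 0
    let gte2_lte3 := PySem.Int.band (PySem.Int.band (PySem.Int.band (neighbors.getD 0 0) (neighbors.getD 1 0)) (Int.not (neighbors.getD 3 0))) 1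
    let eq3 := PySem.Int.band (PySem.Int.band (neighbors.getD 2 0) (Int.not (neighbors.getD 3 0))) 1
    let newState := PySem.Int.band (PySem.Int.bor eq3 (PySem.Int.band gte2_lte3 state)) 1
    newState == wantedState)

-- ===== PORT B =====
-- _check(v) of Source B
def pvCheck (v : Nat) : Bool :=
  let bits : List Nat := (List.range 8).map (fun j => (v >>> j) % 2)
  let c := bits.sum
  let eq3 := bits.getD 2 0 == 1 && bits.getD 3 0 == 0
  let gte2_lte3 := bits.getD 0 0 == 1 && bits.getD 1 0 == 1 && bits.getD 3 0 == 0
  (eq3 == decide (c = 3)) && ((eq3 || gte2_lte3) == (decide (2 ≤ c) && decide (c ≤ 3)))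

-- _ALLOWED of Source B
def pvAllowed : List Bool := (List.range 256).map pvCheck

def isOutputAllowed_alt (output : Int) : Bool :=
  -- _ALLOWED[output % 256]; the index is always in range, so the IndexError arm is unreachable
  (PySem.List.pyGet? pvAllowed (PySem.Int.mod output 256)).getD false

-- ===== PRECONDITION & SPEC =====
def Spec_isOutputAllowed (output : Int) (out : Bool) : Prop := out = isOutputAllowed_alt output
instance (output : Int) (out : Bool) : Decidable (Spec_isOutputAllowed output out) := by unfold Spec_isOutputAllowed; infer_instance

-- ===== CLAIM (what is proved, stated in full; the proofs are below) =====
def Claim_equal_isOutputAllowed : Prop := ∀ (output : Int), Dom_isOutputAllowed output → Spec_isOutputAllowed output (isOutputAllowed output)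

-- ===== LEMMAS AND PROOFS =====

-- bit j (j < 8) of output is determined by output mod 256
lemma pv_bitj (a : Int) (j : Nat) (hj : j < 8) :
    PySem.Int.band (a >>> j) 1 = PySem.Int.band ((a % 256) >>> j) 1 := by
  rw [PySem.Int.band_one, PySem.Int.band_one,
      PySem.Int.mod_eq_emod_of_pos (by norm_num : (0:Int) < 2),
      PySem.Int.mod_eq_emod_of_pos (by norm_num : (0:Int) < 2),
      Int.shiftRight_eq_div_pow, Int.shiftRight_eq_div_pow]
  interval_cases j <;> norm_num <;> omega

lemma pv_A_mod (a : Int) : isOutputAllowed a = isOutputAllowed (a % 256) := by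
  unfold isOutputAllowed
  rw [List.map_congr_left (fun j hj => pv_bitj a j (List.mem_range.mp hj))]

lemma pv_alt_eq (a : Int) : isOutputAllowed_alt a = pvCheck (a % 256).toNat := by
  have h0 : (0:Int) ≤ a % 256 := Int.emod_nonneg a (by norm_num)
  have h1 : a % 256 < 256 := Int.emod_lt_of_pos a (by norm_num)
  have h2 : (a % 256).toNat < 256 := by omega
  unfold isOutputAllowed_alt
  rw [PySem.Int.mod_eq_emod_of_pos (by norm_num : (0:Int) < 256)]
  simp [PySem.List.pyGet?, PySem.List.pyIdx?, pvAllowed, h0, h1, h2]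

set_option maxRecDepth 10000 in
lemma pv_main256 : ∀ m : Nat, m < 256 → isOutputAllowed (m : Int) = pvCheck m := by
  decide

-- ===== VERDICT (by name: the statement is the Claim_ definition above) =====
theorem isOutputAllowed_spec : Claim_equal_isOutputAllowed := by
  intro a _
  show isOutputAllowed a = isOutputAllowed_alt a
  have h0 : (0:Int) ≤ a % 256 := Int.emod_nonneg a (by norm_num)
  have h1 : a % 256 < 256 := Int.emod_lt_of_pos a (by norm_num)
  have hcast : ((a % 256).toNat : Int) = a % 256 := Int.toNat_of_nonneg h0
  rw [pv_A_mod, pv_alt_eq, ← hcast]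
  exact pv_main256 _ (by omega)
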